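-- pv_equiv track=rewrite | github.com/matt1260/OT-Hebrew-Web-Translator | translate/translator.py | get_previous_book
-- ===== SOURCE A (Python) =====
-- book_abbreviations = {
--     'Genesis': 'Gen',
--     'Exodus': 'Exo',
--     'Leviticus': 'Lev',
--     'Numbers': 'Num',
--     'Deuteronomy': 'Deu',
--     'Joshua': 'Jos',
--     'Judges': 'Jdg',
--     'Ruth': 'Rut',
--     '1 Samuel': '1Sa',
--     '2 Samuel': '2Sa',
--     '1 Kings': '1Ki',
--     '2 Kings': '2Ki',
--     '1 Chronicles': '1Ch',
--     '2 Chronicles': '2Ch',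
--     'Ezra': 'Ezr',
--     'Nehemiah': 'Neh',
--     'Esther': 'Est',
--     'Job': 'Job',
--     'Psalms': 'Psa',
--     'Proverbs': 'Pro',
--     'Ecclesiastes': 'Ecc',
--     'Song of Solomon': 'Sng',
--     'Isaiah': 'Isa',
--     'Jeremiah': 'Jer',
--     'Lamentations': 'Lam',
--     'Ezekiel': 'Eze',
--     'Daniel': 'Dan',
--     'Hosea': 'Hos',
--     'Joel': 'Joe',
--     'Amos': 'Amo',
--     'Obadiah': 'Oba',
--     'Jonah': 'Jon',
--     'Micah': 'Mic',
--     'Nahum': 'Nah',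
--     'Habakkuk': 'Hab',
--     'Zephaniah': 'Zep',
--     'Haggai': 'Hag',
--     'Zechariah': 'Zec',
--     'Malachi': 'Mal',
--     'Matthew': 'Mat',
--     'Mark': 'Mar',
--     'Luke': 'Luk',
--     'John': 'Joh',
--     'Acts': 'Act',
--     'Romans': 'Rom',
--     '1 Corinthians': '1Co',
--     '2 Corinthians': '2Co',
--     'Galatians': 'Gal',
--     'Ephesians': 'Eph',
--     'Philippians': 'Php',
--     'Colossians': 'Col',
--     '1 Thessalonians': '1Th',
--     '2 Thessalonians': '2Th',
--     '1 Timothy': '1Ti',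
--     '2 Timothy': '2Ti',
--     'Titus': 'Tit',
--     'Philemon': 'Phm',
--     'Hebrews': 'Heb',
--     'James': 'Jam',
--     '1 Peter': '1Pe',
--     '2 Peter': '2Pe',
--     '1 John': '1Jo',
--     '2 John': '2Jo',
--     '3 John': '3Jo',
--     'Jude': 'Jud',
--     'Revelation': 'Rev'
-- }
--
-- def get_previous_book(abbreviation):
--     for book, abbrev in book_abbreviations.items():
--         if abbrev == abbreviation:
--             # Get the list of book abbreviations
--             abbrevs = list(book_abbreviations.values())
--
--             # Find the index of the current abbreviation
--             current_index = abbrevs.index(abbrev)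
--
--             # Get the previous abbreviation using the index
--             if current_index > 0:
--                 previous_abbrev = abbrevs[current_index - 1]
--                 return previous_abbrev
--             else:
--                 return None  # No previous abbreviation for the first one
--     return None  # Abbreviation not found
-- ===== SOURCE B (Python) =====
-- # Ordered list of the book abbreviations (the values of book_abbreviations, in order).
-- _ABBREVS = ['Gen', 'Exo', 'Lev', 'Num', 'Deu', 'Jos', 'Jdg', 'Rut', '1Sa', '2Sa', '1Ki', '2Ki', '1Ch', '2Ch', 'Ezr', 'Neh', 'Est', 'Job', 'Psa', 'Pro', 'Ecc', 'Sng', 'Isa', 'Jer', 'Lam', 'Eze', 'Dan', 'Hos', 'Joe', 'Amo', 'Oba', 'Jon', 'Mic', 'Nah', 'Hab', 'Zep', 'Hag', 'Zec', 'Mal', 'Mat', 'Mar', 'Luk', 'Joh', 'Act', 'Rom', '1Co', '2Co', 'Gal', 'Eph', 'Php', 'Col', '1Th', '2Th', '1Ti', '2Ti', 'Tit', 'Phm', 'Heb', 'Jam', '1Pe', '2Pe', '1Jo', '2Jo', '3Jo', 'Jud', 'Rev']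
--
-- # Predecessor map: each abbreviation -> the one before it (built once).
-- _PREVIOUS = dict(zip(_ABBREVS[1:], _ABBREVS[:-1]))
--
-- def get_previous_book(abbreviation):
--     return _PREVIOUS.get(abbreviation)
-- ===== Notes on version B (the rewrite author's own statement) =====
-- stated objective: simpler
-- what changed: Replaced the scan-then-rebuild-values-then-.index-then-index-back structure with a predecessor dictionary built once by zipping the ordered abbreviation list with itself shifted by one, so the function body is a single dict .get lookup.
import Mathlib
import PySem

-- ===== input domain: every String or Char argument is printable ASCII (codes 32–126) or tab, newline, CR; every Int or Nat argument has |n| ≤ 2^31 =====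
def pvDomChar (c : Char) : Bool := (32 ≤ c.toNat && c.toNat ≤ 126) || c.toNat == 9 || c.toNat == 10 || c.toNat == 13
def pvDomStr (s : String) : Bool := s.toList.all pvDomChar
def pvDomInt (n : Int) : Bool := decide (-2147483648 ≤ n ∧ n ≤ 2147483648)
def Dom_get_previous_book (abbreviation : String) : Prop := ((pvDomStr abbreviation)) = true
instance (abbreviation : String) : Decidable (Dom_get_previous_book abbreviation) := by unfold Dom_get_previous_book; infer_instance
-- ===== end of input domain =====

-- B replaces A's scan-then-rebuild-then-.index lookup with a predecessor map built once
-- from the ordered abbreviation list (zip of the list with itself shifted), looked up with .get (simpler).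

-- ===== PORT A =====
-- the module constant book_abbreviations (insertion order)
def pvBooks : List (String × String) := [
  ("Genesis", "Gen"),
  ("Exodus", "Exo"),
  ("Leviticus", "Lev"),
  ("Numbers", "Num"),
  ("Deuteronomy", "Deu"),
  ("Joshua", "Jos"),
  ("Judges", "Jdg"),
  ("Ruth", "Rut"),
  ("1 Samuel", "1Sa"),
  ("2 Samuel", "2Sa"),
  ("1 Kings", "1Ki"),
  ("2 Kings", "2Ki"),
  ("1 Chronicles", "1Ch"),
  ("2 Chronicles", "2Ch"),
  ("Ezra", "Ezr"),
  ("Nehemiah", "Neh"),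
  ("Esther", "Est"),
  ("Job", "Job"),
  ("Psalms", "Psa"),
  ("Proverbs", "Pro"),
  ("Ecclesiastes", "Ecc"),
  ("Song of Solomon", "Sng"),
  ("Isaiah", "Isa"),
  ("Jeremiah", "Jer"),
  ("Lamentations", "Lam"),
  ("Ezekiel", "Eze"),
  ("Daniel", "Dan"),
  ("Hosea", "Hos"),
  ("Joel", "Joe"),
  ("Amos", "Amo"),
  ("Obadiah", "Oba"),
  ("Jonah", "Jon"),
  ("Micah", "Mic"),
  ("Nahum", "Nah"),
  ("Habakkuk", "Hab"),
  ("Zephaniah", "Zep"),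
  ("Haggai", "Hag"),
  ("Zechariah", "Zec"),
  ("Malachi", "Mal"),
  ("Matthew", "Mat"),
  ("Mark", "Mar"),
  ("Luke", "Luk"),
  ("John", "Joh"),
  ("Acts", "Act"),
  ("Romans", "Rom"),
  ("1 Corinthians", "1Co"),
  ("2 Corinthians", "2Co"),
  ("Galatians", "Gal"),
  ("Ephesians", "Eph"),
  ("Philippians", "Php"),
  ("Colossians", "Col"),
  ("1 Thessalonians", "1Th"),
  ("2 Thessalonians", "2Th"),
  ("1 Timothy", "1Ti"),
  ("2 Timothy", "2Ti"),
  ("Titus", "Tit"),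
  ("Philemon", "Phm"),
  ("Hebrews", "Heb"),
  ("James", "Jam"),
  ("1 Peter", "1Pe"),
  ("2 Peter", "2Pe"),
  ("1 John", "1Jo"),
  ("2 John", "2Jo"),
  ("3 John", "3Jo"),
  ("Jude", "Jud"),
  ("Revelation", "Rev")]

-- outer 'for book, abbrev in book_abbreviations.items()' loop; on a match it rebuilds
-- the values list, calls .index, and indexes back one step, exactly as A does.
def pvLoopA (abbreviation : String) : List (String × String) → Option String
  | [] => none
  | (_, ab) :: rest =>
    if ab == abbreviation then
      let abbrevs := pvBooks.map Prod.snd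
      match PySem.List.index? abbrevs ab with
      | some i => if (i : Int) > 0 then PySem.List.pyGet? abbrevs ((i : Int) - 1) else none
      | none => none  -- unreachable: abbrev is a value of the dict, so .index never raises
    else pvLoopA abbreviation rest

def get_previous_book (abbreviation : String) : Option String :=
  pvLoopA abbreviation pvBooks

-- ===== PORT B =====
-- Source B's module constant _ABBREVS (the ordered abbreviation list)
def pvAbbrevs : List String := ["Gen", "Exo", "Lev", "Num", "Deu", "Jos", "Jdg", "Rut", "1Sa", "2Sa", "1Ki", "2Ki", "1Ch", "2Ch", "Ezr", "Neh", "Est", "Job", "Psa", "Pro", "Ecc", "Sng", "Isa", "Jer", "Lam", "Eze", "Dan", "Hos", "Joe", "Amo", "Oba", "Jon", "Mic", "Nah", "Hab", "Zep", "Hag", "Zec", "Mal", "Mat", "Mar", "Luk", "Joh", "Act", "Rom", "1Co", "2Co", "Gal", "Eph", "Php", "Col", "1Th", "2Th", "1Ti", "2Ti", "Tit", "Phm", "Heb", "Jam", "1Pe", "2Pe", "1Jo", "2Jo", "3Jo", "Jud", "Rev"]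

-- Source B's _PREVIOUS = dict(zip(_ABBREVS[1:], _ABBREVS[:-1]))
def pvPrevious : PySem.Dict String String :=
  PySem.Dict.ofList (List.zip (PySem.List.slice pvAbbrevs (some 1) none)
                              (PySem.List.slice pvAbbrevs none (some (-1))))

-- Source B's 'return _PREVIOUS.get(abbreviation)'
def get_previous_book_alt (abbreviation : String) : Option String :=
  pvPrevious.get? abbreviation

-- ===== PRECONDITION & SPEC =====
def Spec_get_previous_book (abbreviation : String) (out : Option String) : Prop := out = get_previous_book_alt abbreviation
instance (abbreviation : String) (out : Option String) : Decidable (Spec_get_previous_book abbreviation out) := by unfold Spec_get_previous_book; infer_instance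

-- ===== CLAIM (what is proved, stated in full; the proofs are below) =====
def Claim_equal_get_previous_book : Prop := ∀ (abbreviation : String), Dom_get_previous_book abbreviation → Spec_get_previous_book abbreviation (get_previous_book abbreviation)

-- ===== LEMMAS AND PROOFS =====

-- A's loop returns None when the abbreviation matches no value of the dict
theorem pv_loopA_none (a : String) :
    ∀ bs : List (String × String), a ∉ bs.map Prod.snd → pvLoopA a bs = none := by
  intro bs
  induction bs with
  | nil => intro _; rfl
  | cons b rest ih =>
    intro h
    obtain ⟨bk, v⟩ := b
    have hv : ¬ v = a := fun e => h (by simp [e])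
    have hne : (v == a) = false := by simpa using hv
    simpa [pvLoopA, hne] using ih (fun m => h (by simp [m]))

-- the values of the dict, in order, are exactly Source B's abbreviation list (closed computation)
set_option maxRecDepth 8192 in
theorem pv_vals_eq : pvBooks.map Prod.snd = pvAbbrevs := by decide

-- every key of B's predecessor map is one of the abbreviations (closed computation)
set_option maxRecDepth 8192 in
theorem pv_keys_sub : ∀ x ∈ pvPrevious.keys, x ∈ pvAbbrevs := by decide

set_option maxRecDepth 8192 in
theorem pv_agree (a : String) : pvLoopA a pvBooks = pvPrevious.get? a := by
  by_cases h : a ∈ pvAbbrevs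
  · fin_cases h <;> decide
  · have hA : pvLoopA a pvBooks = none := by
      apply pv_loopA_none
      rw [pv_vals_eq]
      exact h
    have hB : pvPrevious.get? a = none :=
      (PySem.Dict.get?_eq_none_iff_not_mem_keys _ _).mpr (fun hk => h (pv_keys_sub a hk))
    rw [hA, hB]

-- ===== VERDICT (by name: the statement is the Claim_ definition above) =====
theorem get_previous_book_spec : Claim_equal_get_previous_book := by
  intro a _
  unfold Spec_get_previous_book get_previous_book get_previous_book_alt
  exact pv_agree a
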